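-- pv_equiv track=rewrite | github.com/Orizohar345/Courses-Materials- | Introduction to system programing - 234124 /hw3 - Phyton/hw3_part2.py | canTheySwitch
-- ===== SOURCE A (Python) =====
-- def canTheySwitch(string1, string2):
--     string3 = string1
--     string4 = ""
--     if not len(string1) == len(string2):
--         return False
--     for i in range(len(string1)):
--         if string1[i] == string3[i]:
--             string1 = string1.replace(string1[i], string2[i])
--         string4 = string4 + string1[i]
--     if string4 == string2:
--         return True
--     return False
-- ===== SOURCE B (Python) =====
-- def canTheySwitch(string1, string2):
--     # Union-find over characters: classes of characters that currently share a value.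
--     if len(string1) != len(string2):
--         return False
--     alphabet = set(string1) | set(string2)
--     parent = {c: c for c in alphabet}   # union-find forest
--     value = {c: c for c in alphabet}    # class root -> the value all its members currently map to
--     owner = {c: c for c in alphabet}    # value v -> some node of the class whose value is v (or None)
--
--     def find(x):
--         while parent[x] != x:
--             x = parent[x]
--         return x
--
--     for a, b in zip(string1, string2):
--         ra = find(a)
--         if value[ra] == a:
--             # replace a -> b: the class with value a takes value b,
--             # merging with the class that already holds value b, if any
--             rb = owner[b]
--             if rb is not None:
--                 rb = find(rb)
--                 if rb != ra:
--                     parent[rb] = ra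
--             value[ra] = b
--             owner[a] = None
--             owner[b] = ra
--         elif value[ra] != b:
--             return False
--     return True
-- ===== Notes on version B (the rewrite author's own statement) =====
-- stated objective: faster
-- what changed: A rewrites the whole working string with str.replace at every position and compares the accumulated string at the end; B keeps a union-find forest over characters (classes of characters sharing a current value, with per-class value and a value->class owner index), doing one find/union per position with early exit.
import Mathlib
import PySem

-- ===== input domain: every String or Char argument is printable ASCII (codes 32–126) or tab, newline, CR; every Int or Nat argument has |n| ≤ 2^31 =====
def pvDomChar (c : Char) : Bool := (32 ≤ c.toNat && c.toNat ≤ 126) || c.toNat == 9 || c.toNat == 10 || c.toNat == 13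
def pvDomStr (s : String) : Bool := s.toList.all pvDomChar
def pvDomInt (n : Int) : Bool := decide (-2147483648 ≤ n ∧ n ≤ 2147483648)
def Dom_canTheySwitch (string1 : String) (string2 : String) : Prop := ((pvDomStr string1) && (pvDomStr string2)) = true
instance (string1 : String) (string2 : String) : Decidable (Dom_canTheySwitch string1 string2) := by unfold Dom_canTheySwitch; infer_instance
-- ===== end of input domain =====

-- B replaces A's per-position full-string `replace` rewrites by a union-find forest over
-- characters (classes of characters sharing a value), one near-constant-time step per position
-- (objective: faster).

-- ===== PORT A =====
def canTheySwitch (string1 : String) (string2 : String) : Bool :=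
  -- string3 = string1 (the original); string4 accumulates; the loop rebinds string1
  let string3 := string1.toList
  if !(string1.toList.length == string2.toList.length) then false
  else
    let st := (List.range string1.toList.length).foldl
      (fun (st : List Char × List Char) (i : Nat) =>
        let s1 :=
          if PySem.List.pyGetD st.1 (i : Int) ' ' = PySem.List.pyGetD string3 (i : Int) ' ' then
            PySem.Chars.replace st.1 [PySem.List.pyGetD st.1 (i : Int) ' ']
              [PySem.List.pyGetD string2.toList (i : Int) ' ']
          else st.1
        (s1, st.2 ++ [PySem.List.pyGetD s1 (i : Int) ' ']))
      (string1.toList, ([] : List Char))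
    decide (st.2 = string2.toList)

-- ===== PORT B =====
-- Source B's `find`: follow parent pointers to the root.  Python's `while` has no fuel; the fuel
-- argument only makes the same chase total — `len(string1) + 1` is provably enough (the forest
-- depth grows by at most 1 per union, one union per loop step).  `parent[x]` is Python's
-- d[x]; the key is always present on reachable inputs, so getD with default x is exact there.
def ufFind (parent : PySem.Dict Char Char) : Nat → Char → Char
  | 0, x => x
  | fuel + 1, x =>
    let p := parent.getD x x
    if p = x then x else ufFind parent fuel p

-- Source B's `rb = owner[b]; if rb is not None: ...` — the optional union of one loop step
def ufUnion (parent : PySem.Dict Char Char) (F : Nat) (ra : Char) :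
    Option Char → PySem.Dict Char Char
  | some r0 =>
    let rb := ufFind parent F r0
    if rb ≠ ra then parent.insert rb ra else parent
  | none => parent

-- Source B's main loop over zip(string1, string2)
def ufGo (F : Nat) : List (Char × Char) → PySem.Dict Char Char → PySem.Dict Char Char →
    PySem.Dict Char (Option Char) → Bool
  | [], _, _, _ => true
  | (a, b) :: rest, parent, value, owner =>
    let ra := ufFind parent F a
    if value.getD ra ra = a then
      ufGo F rest (ufUnion parent F ra (owner.getD b none))
        (value.insert ra b) ((owner.insert a none).insert b (some ra))
    else if value.getD ra ra ≠ b then false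
    else ufGo F rest parent value owner

def canTheySwitch_alt (string1 : String) (string2 : String) : Bool :=
  if string1.toList.length ≠ string2.toList.length then false
  else
    let alphabet : PySem.Set Char :=
      PySem.Set.union (PySem.Set.ofList string1.toList) string2.toList
    let parent := alphabet.foldl (fun d c => d.insert c c) PySem.Dict.empty
    let value := alphabet.foldl (fun d c => d.insert c c) PySem.Dict.empty
    let owner := alphabet.foldl (fun d c => d.insert c (some c))
      (PySem.Dict.empty : PySem.Dict Char (Option Char))
    ufGo (string1.toList.length + 1) (string1.toList.zip string2.toList) parent value owner

-- ===== PRECONDITION & SPEC =====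
def Spec_canTheySwitch (string1 : String) (string2 : String) (out : Bool) : Prop :=
  out = canTheySwitch_alt string1 string2
instance (string1 : String) (string2 : String) (out : Bool) :
    Decidable (Spec_canTheySwitch string1 string2 out) := by
  unfold Spec_canTheySwitch; infer_instance

-- ===== CLAIM (what is proved, stated in full; the proofs are below) =====
def Claim_equal_canTheySwitch : Prop := ∀ (string1 : String) (string2 : String),
  Dom_canTheySwitch string1 string2 →
    Spec_canTheySwitch string1 string2 (canTheySwitch string1 string2)

-- ===== LEMMAS AND PROOFS =====

-- `c ↦ if g c = a then b else g c`: the effect of one whole-string replace on the mapping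
def pvSubst (a b : Char) (g : Char → Char) : Char → Char := fun c => if g c = a then b else g c

-- the chars both loops produce, expressed over the pure mapping g
def pvRun : List (Char × Char) → (Char → Char) → List Char
  | [], _ => []
  | (a, b) :: rest, g => if g a = a then b :: pvRun rest (pvSubst a b g) else g a :: pvRun rest g

theorem pvReplace_go_singleton (a b : Char) :
    ∀ (l : List Char) (acc : List Char) (fuel : Nat), l.length ≤ fuel →
      PySem.Chars.replace.go [a] [b] fuel l acc
        = acc.reverse ++ l.map (fun c => if c = a then b else c) := by
  intro l
  induction l with
  | nil =>
    intro acc fuel _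
    cases fuel <;> simp [PySem.Chars.replace.go]
  | cons c t ih =>
    intro acc fuel hf
    cases fuel with
    | zero => simp at hf
    | succ fuel =>
      by_cases hca : c = a
      · subst hca
        have hpre : [c].isPrefixOf (c :: t) = true := by simp [List.isPrefixOf]
        simp only [PySem.Chars.replace.go, hpre, if_pos]
        rw [show List.drop [c].length (c :: t) = t by simp,
          show ([b].reverse ++ acc) = b :: acc by simp,
          ih (b :: acc) fuel (by simpa using Nat.le_of_succ_le_succ hf)]
        simp
      · have hpre : [a].isPrefixOf (c :: t) = false := by
          simp [List.isPrefixOf]; exact fun h => (hca h.symm).elim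
        simp only [PySem.Chars.replace.go, hpre]
        rw [ih (c :: acc) fuel (by simpa using Nat.le_of_succ_le_succ hf)]
        simp [hca]

theorem pvReplace_singleton (l : List Char) (a b : Char) :
    PySem.Chars.replace l [a] [b] = l.map (fun c => if c = a then b else c) := by
  unfold PySem.Chars.replace
  simp [pvReplace_go_singleton a b l [] l.length le_rfl]

theorem pvA_inv (s3 s2 : List Char) (hlen : s3.length = s2.length) :
    ∀ (k i : Nat) (g : Char → Char) (s4 : List Char), i + k = s3.length →
      ((List.range' i k).foldl
        (fun (st : List Char × List Char) (i : Nat) =>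
          let s1 :=
            if PySem.List.pyGetD st.1 (i : Int) ' ' = PySem.List.pyGetD s3 (i : Int) ' ' then
              PySem.Chars.replace st.1 [PySem.List.pyGetD st.1 (i : Int) ' ']
                [PySem.List.pyGetD s2 (i : Int) ' ']
            else st.1
          (s1, st.2 ++ [PySem.List.pyGetD s1 (i : Int) ' ']))
        (s3.map g, s4)).2
      = s4 ++ pvRun ((s3.zip s2).drop i) g := by
  intro k
  induction k with
  | zero =>
    intro i g s4 hik
    have : (s3.zip s2).drop i = [] := by
      apply List.drop_eq_nil_of_le
      simp [List.length_zip]; omega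
    simp [this, pvRun]
  | succ k ih =>
    intro i g s4 hik
    have hi : i < s3.length := by omega
    have hi2 : i < s2.length := by omega
    have hget3 : PySem.List.pyGetD s3 (i : Int) ' ' = s3[i] :=
      PySem.List.pyGetD_ofNat s3 i ' ' hi
    have hget2 : PySem.List.pyGetD s2 (i : Int) ' ' = s2[i] :=
      PySem.List.pyGetD_ofNat s2 i ' ' hi2
    have hgetg : ∀ h : Char → Char, PySem.List.pyGetD (s3.map h) (i : Int) ' ' = h s3[i] := by
      intro h
      rw [PySem.List.pyGetD_ofNat (s3.map h) i ' ' (by simpa using hi)]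
      simp
    have hdrop : (s3.zip s2).drop i = (s3[i], s2[i]) :: (s3.zip s2).drop (i + 1) := by
      rw [List.drop_eq_getElem_cons (by simp [List.length_zip]; omega)]
      simp
    rw [List.range'_succ, List.foldl_cons]
    by_cases hcond : g s3[i] = s3[i]
    · have hrep : PySem.Chars.replace (s3.map g) [g s3[i]] [s2[i]]
          = s3.map (pvSubst s3[i] s2[i] g) := by
        rw [pvReplace_singleton]
        simp only [List.map_map]
        apply List.map_congr_left
        intro c _
        simp [pvSubst, Function.comp, hcond]
      have happ : pvSubst s3[i] s2[i] g s3[i] = s2[i] := by simp [pvSubst, hcond]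
      simp only [hgetg, hget3, hget2, if_pos hcond, hrep, happ]
      rw [ih (i + 1) (pvSubst s3[i] s2[i] g) (s4 ++ [s2[i]]) (by omega), hdrop]
      simp [pvRun, hcond]
    · simp only [hgetg, hget3, if_neg hcond]
      rw [ih (i + 1) g (s4 ++ [g s3[i]]) (by omega), hdrop]
      simp [pvRun, hcond]

-- ---- union-find forest machinery (B side) ----

def pvStep (parent : PySem.Dict Char Char) (c : Char) : Char := parent.getD c c

inductive pvReach (parent : PySem.Dict Char Char) : Char → Char → Prop
  | root (x : Char) (h : pvStep parent x = x) : pvReach parent x x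
  | step (x r : Char) (h : pvStep parent x ≠ x) (h2 : pvReach parent (pvStep parent x) r) :
      pvReach parent x r

theorem pvReach_unique {parent : PySem.Dict Char Char} {x r r' : Char}
    (h1 : pvReach parent x r) (h2 : pvReach parent x r') : r = r' := by
  induction h1 with
  | root x h =>
    cases h2 with
    | root _ _ => rfl
    | step _ _ h' _ => exact absurd h h'
  | step x r h hr ih =>
    cases h2 with
    | root _ h' => exact absurd h' h
    | step _ _ _ h2' => exact ih h2'

theorem pvReach_root {parent : PySem.Dict Char Char} {x r : Char}
    (h : pvReach parent x r) : pvStep parent r = r := by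
  induction h with
  | root _ h => exact h
  | step _ _ _ _ ih => exact ih

theorem pvFind_reach {parent : PySem.Dict Char Char} {d : Char → Nat}
    (Hd : ∀ c, pvStep parent c ≠ c → d (pvStep parent c) < d c) :
    ∀ (F : Nat) (x : Char), d x ≤ F → pvReach parent x (ufFind parent F x) := by
  intro F
  induction F with
  | zero =>
    intro x hx
    have hroot : pvStep parent x = x := by
      by_contra h
      have := Hd x h
      omega
    simpa [ufFind] using pvReach.root x hroot
  | succ F ih =>
    intro x hx
    by_cases h : pvStep parent x = x
    · have : ufFind parent (F + 1) x = x := by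
        simp only [ufFind]
        simp only [pvStep] at h
        simp [h]
      rw [this]
      exact pvReach.root x h
    · have hlt := Hd x h
      have h2 : pvReach parent (pvStep parent x) (ufFind parent F (pvStep parent x)) :=
        ih (pvStep parent x) (by omega)
      have h3 : pvReach parent x (ufFind parent F (pvStep parent x)) := pvReach.step x _ h h2
      have : ufFind parent (F + 1) x = ufFind parent F (pvStep parent x) := by
        simp only [ufFind]
        simp only [pvStep] at h ⊢
        simp [h]
      rw [this]
      exact h3

theorem pvStep_insert (parent : PySem.Dict Char Char) (rb ra c : Char) :
    pvStep (parent.insert rb ra) c = if c = rb then ra else pvStep parent c := by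
  simp [pvStep, PySem.Dict.getD_insert]

theorem pvReach_insert {parent : PySem.Dict Char Char} {rb ra : Char}
    (hrb : pvStep parent rb = rb) (hra : pvStep parent ra = ra) (hne : rb ≠ ra) :
    ∀ {x r : Char}, pvReach parent x r →
      pvReach (parent.insert rb ra) x (if r = rb then ra else r) := by
  intro x r h
  induction h with
  | root y h =>
    by_cases hy : y = rb
    · subst hy
      rw [if_pos rfl]
      have h1 : pvStep (parent.insert y ra) y = ra := by
        rw [pvStep_insert, if_pos rfl]
      have h2 : pvStep (parent.insert y ra) ra = ra := by
        rw [pvStep_insert, if_neg (Ne.symm hne)]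
        exact hra
      refine pvReach.step _ _ ?_ ?_
      · rw [h1]; exact Ne.symm hne
      · rw [h1]; exact pvReach.root _ h2
    · rw [if_neg hy]
      refine pvReach.root _ ?_
      rw [pvStep_insert, if_neg hy]
      exact h
  | step y r h h2 ih =>
    have hy : y ≠ rb := by
      intro e; subst e; exact h hrb
    have hs : pvStep (parent.insert rb ra) y = pvStep parent y := by
      rw [pvStep_insert, if_neg hy]
    refine pvReach.step _ _ ?_ ?_
    · rw [hs]; exact h
    · rw [hs]; exact ih

-- the initial dicts {c: f(c) for c in alphabet}
theorem pvInitGetD {β : Type} (A : List Char) (f : Char → β) (hnd : A.Nodup)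
    (x : Char) (dflt : β) :
    ((A.foldl (fun d c => d.insert c (f c)) PySem.Dict.empty).getD x dflt)
      = if x ∈ A then f x else dflt := by
  have hitems : (A.foldl (fun d c => d.insert c (f c)) PySem.Dict.empty).items
      = (PySem.Dict.empty : PySem.Dict Char β).items ++ A.map (fun a => (a, f a)) :=
    PySem.Dict.items_foldl_insert_fresh (l := A) (k := id) (v := f)
      (d := PySem.Dict.empty) (by intro a _; simp [PySem.Dict.contains_empty]) (by simpa using hnd)
  have hkeysnd : (A.foldl (fun d c => d.insert c (f c)) PySem.Dict.empty).keys.Nodup :=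
    PySem.Dict.nodup_keys_foldl_insert A (fun _ c => f c) _ PySem.Dict.nodup_keys_empty
  by_cases hx : x ∈ A
  · rw [if_pos hx]
    refine PySem.Dict.getD_of_mem_items _ ?_ hkeysnd dflt
    rw [hitems]
    simp only [List.mem_append]
    exact Or.inr (List.mem_map.mpr ⟨x, hx, rfl⟩)
  · rw [if_neg hx]
    refine PySem.Dict.getD_of_get?_eq_none _ _ ?_
    rw [PySem.Dict.get?_eq_none_iff_not_mem_keys]
    simp only [PySem.Dict.keys, hitems]
    simp only [List.map_append, List.mem_append, List.map_map]
    rintro (h | h)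
    · simp [show (PySem.Dict.empty : PySem.Dict Char β).items = [] from rfl] at h
    · simp only [List.mem_map, Function.comp] at h
      obtain ⟨a, ha, rfl⟩ := h
      exact hx ha

-- the cons equation of ufGo, spelled out
theorem ufGo_cons (F : Nat) (a b : Char) (rest : List (Char × Char))
    (parent value : PySem.Dict Char Char) (owner : PySem.Dict Char (Option Char)) :
    ufGo F ((a, b) :: rest) parent value owner =
      (let ra := ufFind parent F a
       if value.getD ra ra = a then
        ufGo F rest (ufUnion parent F ra (owner.getD b none))
          (value.insert ra b) ((owner.insert a none).insert b (some ra))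
       else if value.getD ra ra ≠ b then false
       else ufGo F rest parent value owner) := rfl

theorem ufGo_eq (F : Nat) (A : List Char) :
    ∀ (pairs : List (Char × Char)) (parent value : PySem.Dict Char Char)
      (owner : PySem.Dict Char (Option Char)) (g : Char → Char) (d : Char → Nat)
      (rt : Char → Char),
      (∀ p ∈ pairs, p.1 ∈ A ∧ p.2 ∈ A) →
      (∀ c, pvStep parent c ≠ c → d (pvStep parent c) < d c) →
      (∀ c, pvStep parent c = c → d c = 0) →
      (∀ c, d c + pairs.length < F) →
      (∀ c, pvReach parent c (rt c)) →
      (∀ c ∈ A, g c = value.getD (rt c) (rt c)) →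
      (∀ c ∈ A, ∃ r, owner.getD (g c) none = some r ∧ rt r = rt c) →
      (∀ v r, owner.getD v none = some r → value.getD (rt r) (rt r) = v) →
      ufGo F pairs parent value owner = decide (pvRun pairs g = pairs.map Prod.snd) := by
  intro pairs
  induction pairs with
  | nil => intro parent value owner g d rt _ _ _ _ _ _ _ _; simp [ufGo, pvRun]
  | cons p rest ih =>
    obtain ⟨a, b⟩ := p
    intro parent value owner g d rt Hab Hd Hd0 HF Hrt Hg Ho1 Ho2
    have ha : a ∈ A := (Hab (a, b) (by simp)).1
    have hb : b ∈ A := (Hab (a, b) (by simp)).2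
    have Hab' : ∀ p ∈ rest, p.1 ∈ A ∧ p.2 ∈ A := fun p hp => Hab p (by simp [hp])
    have hrt_unique : ∀ {c r : Char}, pvReach parent c r → r = rt c :=
      fun h => pvReach_unique h (Hrt _)
    have hrt_root : ∀ c, pvStep parent (rt c) = rt c := fun c => pvReach_root (Hrt c)
    have hrtrt : ∀ c, rt (rt c) = rt c :=
      fun c => (hrt_unique (pvReach.root (rt c) (hrt_root c))).symm
    have hdrt : ∀ c, d (rt c) = 0 := fun c => Hd0 _ (hrt_root c)
    have hstep_rt : ∀ c, pvStep parent c ≠ c → rt (pvStep parent c) = rt c := by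
      intro c hc
      have h2 : pvReach parent (pvStep parent c) (rt c) := by
        have h := Hrt c
        generalize rt c = r at h
        cases h with
        | root _ h0 => exact absurd h0 hc
        | step _ _ _ h2 => exact h2
      exact (hrt_unique h2).symm
    have hra : ufFind parent F a = rt a :=
      hrt_unique (pvFind_reach Hd F a (by have := HF a; omega))
    rw [ufGo_cons]
    simp only [hra]
    by_cases hcond : value.getD (rt a) (rt a) = a
    · -- Python: value[ra] == a, i.e. g a = a
      rw [if_pos hcond]
      have hga : g a = a := (Hg a ha).trans hcond
      have U : ∀ c ∈ A, g c = a → rt c = rt a := by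
        intro c hc hgc
        obtain ⟨r, hr1, hr2⟩ := Ho1 c hc
        obtain ⟨r', hr1', hr2'⟩ := Ho1 a ha
        rw [hgc] at hr1
        rw [hga] at hr1'
        rw [hr1'] at hr1
        obtain rfl := Option.some.inj hr1
        rw [← hr2, hr2']
      have hrun : pvRun ((a, b) :: rest) g = b :: pvRun rest (pvSubst a b g) := by
        simp [pvRun, hga]
      rw [hrun]
      rcases howner_eq : owner.getD b none with _ | r0
      · -- no class currently holds value b
        rw [show ufUnion parent F (rt a) none = parent from rfl]
        have NB : ∀ c ∈ A, g c ≠ b := by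
          intro c hc hgc
          obtain ⟨r, hr, _⟩ := Ho1 c hc
          rw [hgc, howner_eq] at hr
          cases hr
        have hba : b ≠ a := by
          intro e
          exact NB a ha (by rw [hga, e])
        rw [ih parent (value.insert (rt a) b) ((owner.insert a none).insert b (some (rt a)))
          (pvSubst a b g) d rt Hab' Hd Hd0
          (by intro c; have := HF c; simp at this ⊢; omega) Hrt
          ?_ ?_ ?_]
        · simp
        · -- Hg'
          intro c hc
          by_cases hgc : g c = a
          · have hrc := U c hc hgc
            rw [show pvSubst a b g c = b by simp [pvSubst, hgc], hrc,
              PySem.Dict.getD_insert, if_pos rfl]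
          · have hne : rt c ≠ rt a := by
              intro e
              exact hgc ((Hg c hc).trans (by rw [e]; exact hcond))
            rw [show pvSubst a b g c = g c by simp [pvSubst, hgc],
              PySem.Dict.getD_insert, if_neg hne]
            exact Hg c hc
        · -- Ho1'
          intro c hc
          by_cases hgc : g c = a
          · refine ⟨rt a, ?_, ?_⟩
            · rw [show pvSubst a b g c = b by simp [pvSubst, hgc],
                PySem.Dict.getD_insert, if_pos rfl]
            · rw [hrtrt, U c hc hgc]
          · obtain ⟨r, hr1, hr2⟩ := Ho1 c hc
            refine ⟨r, ?_, hr2⟩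
            rw [show pvSubst a b g c = g c by simp [pvSubst, hgc],
              PySem.Dict.getD_insert, if_neg (NB c hc),
              PySem.Dict.getD_insert, if_neg hgc]
            exact hr1
        · -- Ho2'
          intro v r hr
          rw [PySem.Dict.getD_insert] at hr
          by_cases hv : v = b
          · rw [if_pos hv] at hr
            obtain rfl := Option.some.inj hr
            rw [hrtrt, PySem.Dict.getD_insert, if_pos rfl, hv]
          · rw [if_neg hv, PySem.Dict.getD_insert] at hr
            by_cases hva : v = a
            · rw [if_pos hva] at hr; cases hr
            · rw [if_neg hva] at hr
              have h2 := Ho2 v r hr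
              have hne : rt r ≠ rt a := by
                intro e
                rw [e, hcond] at h2
                exact hva h2.symm
              rw [PySem.Dict.getD_insert, if_neg hne]
              exact h2
      · -- some class (root class of r0) holds value b
        have hrb : ufFind parent F r0 = rt r0 :=
          hrt_unique (pvFind_reach Hd F r0 (by have := HF r0; omega))
        have vb : value.getD (rt r0) (rt r0) = b := Ho2 b r0 howner_eq
        simp only [ufUnion, hrb]
        by_cases hmerge : rt r0 = rt a
        · -- the class holding b IS a's class: then b = a, everything is unchanged
          rw [if_neg (by simp [hmerge])]
          have hab : a = b := by rw [← hcond, ← hmerge, vb]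
          have hsub : pvSubst a b g = g := by
            funext c
            by_cases hgc : g c = a <;> simp [pvSubst, hgc, ← hab]
          rw [hsub]
          rw [ih parent (value.insert (rt a) b) ((owner.insert a none).insert b (some (rt a)))
            g d rt Hab' Hd Hd0
            (by intro c; have := HF c; simp at this ⊢; omega) Hrt
            ?_ ?_ ?_]
          · simp
          · -- Hg'
            intro c hc
            by_cases hrc : rt c = rt a
            · rw [hrc, PySem.Dict.getD_insert, if_pos rfl, ← hab]
              rw [Hg c hc, hrc, hcond]
            · rw [PySem.Dict.getD_insert, if_neg hrc]
              exact Hg c hc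
          · -- Ho1'
            intro c hc
            by_cases hgc : g c = a
            · refine ⟨rt a, ?_, by rw [hrtrt, U c hc hgc]⟩
              rw [hgc, hab, PySem.Dict.getD_insert, if_pos rfl]
            · obtain ⟨r, hr1, hr2⟩ := Ho1 c hc
              refine ⟨r, ?_, hr2⟩
              have hgb : g c ≠ b := by rw [← hab]; exact hgc
              rw [PySem.Dict.getD_insert, if_neg hgb, PySem.Dict.getD_insert, if_neg hgc]
              exact hr1
          · -- Ho2'
            intro v r hr
            rw [PySem.Dict.getD_insert] at hr
            by_cases hv : v = b
            · rw [if_pos hv] at hr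
              obtain rfl := Option.some.inj hr
              rw [hrtrt, PySem.Dict.getD_insert, if_pos rfl, hv]
            · rw [if_neg hv, PySem.Dict.getD_insert] at hr
              by_cases hva : v = a
              · rw [if_pos hva] at hr; cases hr
              · rw [if_neg hva] at hr
                have h2 := Ho2 v r hr
                have hne : rt r ≠ rt a := by
                  intro e
                  rw [e, hcond] at h2
                  exact hva h2.symm
                rw [PySem.Dict.getD_insert, if_neg hne]
                exact h2
        · -- genuine union: attach root (rt r0) below root (rt a)
          rw [if_pos (by simp [hmerge])]
          have hba : b ≠ a := by
            intro e
            obtain ⟨r, hr1, hr2⟩ := Ho1 a ha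
            rw [hga, ← e, howner_eq] at hr1
            obtain rfl := Option.some.inj hr1
            exact hmerge hr2
          have hrbroot : pvStep parent (rt r0) = rt r0 := hrt_root r0
          have hraroot : pvStep parent (rt a) = rt a := hrt_root a
          have MB : ∀ c ∈ A, g c = b → rt c = rt r0 := by
            intro c hc hgc
            obtain ⟨r, hr1, hr2⟩ := Ho1 c hc
            rw [hgc, howner_eq] at hr1
            obtain rfl := Option.some.inj hr1
            exact hr2.symm
          rw [ih (parent.insert (rt r0) (rt a)) (value.insert (rt a) b)
            ((owner.insert a none).insert b (some (rt a)))
            (pvSubst a b g)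
            (fun c => if rt c = rt r0 then d c + 1 else d c)
            (fun c => if rt c = rt r0 then rt a else rt c)
            Hab' ?_ ?_ ?_ ?_ ?_ ?_ ?_]
          · simp
          · -- Hd'
            intro c hc
            beta_reduce
            by_cases hcrb : c = rt r0
            · subst hcrb
              rw [pvStep_insert, if_pos rfl] at hc ⊢
              rw [if_neg (by rw [hrtrt]; exact fun e => hmerge e.symm),
                if_pos (hrtrt r0), hdrt]
              omega
            · rw [pvStep_insert, if_neg hcrb] at hc ⊢
              have hrr := hstep_rt c hc
              have hd := Hd c hc
              rw [hrr]
              by_cases h : rt c = rt r0 <;> simp [h] <;> omega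
          · -- Hd0'
            intro c hc
            beta_reduce
            rw [pvStep_insert] at hc
            by_cases hcrb : c = rt r0
            · rw [if_pos hcrb] at hc
              exact absurd (hc.trans hcrb).symm hmerge
            · rw [if_neg hcrb] at hc
              have : rt c = c := (hrt_unique (pvReach.root c hc)).symm
              rw [if_neg (by rw [this]; exact hcrb)]
              exact Hd0 c hc
          · -- HF'
            intro c
            beta_reduce
            have := HF c
            simp only [List.length_cons] at this
            by_cases h : rt c = rt r0 <;> simp [h] <;> omega
          · -- Hrt'
            intro c
            beta_reduce
            have := pvReach_insert hrbroot hraroot hmerge (Hrt c)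
            by_cases h : rt c = rt r0
            · rw [if_pos h] at this; rw [if_pos h]; exact this
            · rw [if_neg h] at this; rw [if_neg h]; exact this
          · -- Hg'
            intro c hc
            beta_reduce
            by_cases h1 : rt c = rt r0
            · have hgc : g c = b := by rw [Hg c hc, h1, vb]
              rw [show pvSubst a b g c = b by simp [pvSubst, hgc, hba],
                if_pos h1, PySem.Dict.getD_insert, if_pos rfl]
            · rw [if_neg h1]
              by_cases h2 : rt c = rt a
              · have hgc : g c = a := by rw [Hg c hc, h2, hcond]
                rw [show pvSubst a b g c = b by simp [pvSubst, hgc], h2,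
                  PySem.Dict.getD_insert, if_pos rfl]
              · have hgc : g c ≠ a := fun e => h2 (U c hc e)
                rw [show pvSubst a b g c = g c by simp [pvSubst, hgc],
                  PySem.Dict.getD_insert, if_neg h2]
                exact Hg c hc
          · -- Ho1'
            intro c hc
            beta_reduce
            by_cases h1 : rt c = rt r0
            · have hgc : g c = b := by rw [Hg c hc, h1, vb]
              refine ⟨rt a, ?_, ?_⟩
              · rw [show pvSubst a b g c = b by simp [pvSubst, hgc, hba],
                  PySem.Dict.getD_insert, if_pos rfl]
              · rw [if_pos h1, if_neg (by rw [hrtrt]; exact fun e => hmerge e.symm), hrtrt]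
            · by_cases h2 : rt c = rt a
              · have hgc : g c = a := by rw [Hg c hc, h2, hcond]
                refine ⟨rt a, ?_, ?_⟩
                · rw [show pvSubst a b g c = b by simp [pvSubst, hgc],
                    PySem.Dict.getD_insert, if_pos rfl]
                · rw [if_neg h1, h2,
                    if_neg (by rw [hrtrt]; exact fun e => hmerge e.symm), hrtrt]
              · have hgc : g c ≠ a := fun e => h2 (U c hc e)
                have hgb : g c ≠ b := fun e => h1 (MB c hc e)
                obtain ⟨r, hr1, hr2⟩ := Ho1 c hc
                refine ⟨r, ?_, ?_⟩
                · rw [show pvSubst a b g c = g c by simp [pvSubst, hgc],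
                    PySem.Dict.getD_insert, if_neg hgb, PySem.Dict.getD_insert, if_neg hgc]
                  exact hr1
                · rw [if_neg (by rw [hr2]; exact h1), if_neg h1, hr2]
          · -- Ho2'
            intro v r hr
            beta_reduce
            rw [PySem.Dict.getD_insert] at hr
            by_cases hv : v = b
            · rw [if_pos hv] at hr
              obtain rfl := Option.some.inj hr
              rw [if_neg (by rw [hrtrt]; exact fun e => hmerge e.symm), hrtrt,
                PySem.Dict.getD_insert, if_pos rfl, hv]
            · rw [if_neg hv, PySem.Dict.getD_insert] at hr
              by_cases hva : v = a
              · rw [if_pos hva] at hr; cases hr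
              · rw [if_neg hva] at hr
                have h2 := Ho2 v r hr
                have hner : rt r ≠ rt r0 := by
                  intro e
                  rw [e, vb] at h2
                  exact hv h2.symm
                have hnea : rt r ≠ rt a := by
                  intro e
                  rw [e, hcond] at h2
                  exact hva h2.symm
                rw [if_neg hner, PySem.Dict.getD_insert, if_neg hnea]
                exact h2
    · -- Python: value[ra] != a, i.e. g a != a
      rw [if_neg hcond]
      have hga : g a ≠ a := fun e => hcond (((Hg a ha).symm.trans e))
      have hgav : g a = value.getD (rt a) (rt a) := Hg a ha
      have hrun : pvRun ((a, b) :: rest) g = g a :: pvRun rest g := by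
        simp [pvRun, hga]
      rw [hrun]
      by_cases hgb : value.getD (rt a) (rt a) = b
      · rw [if_neg (by simp [hgb])]
        rw [ih parent value owner g d rt Hab' Hd Hd0
          (by intro c; have := HF c; simp at this ⊢; omega) Hrt Hg Ho1 Ho2]
        simp [hgav, hgb]
      · rw [if_pos (by simp [hgb])]
        have : g a ≠ b := by rw [hgav]; exact hgb
        simp [this]

-- ===== VERDICT (by name: the statement is the Claim_ definition above) =====
theorem canTheySwitch_spec : Claim_equal_canTheySwitch := by
  intro string1 string2 _
  unfold Spec_canTheySwitch canTheySwitch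
  simp only [canTheySwitch_alt]
  by_cases hlen : string1.toList.length = string2.toList.length
  · simp only [hlen, beq_self_eq_true, Bool.not_true, Bool.false_eq_true, if_false,
      if_neg (by omega : ¬ string2.toList.length ≠ string2.toList.length)]
    have hfold := pvA_inv string1.toList string2.toList hlen string1.toList.length 0 id []
      (by omega)
    rw [show (string1.toList.map id) = string1.toList from List.map_id _] at hfold
    rw [show List.range' 0 string1.toList.length = List.range string1.toList.length from
      List.range_eq_range'.symm] at hfold
    simp only [List.drop_zero, List.nil_append] at hfold
    rw [hlen] at hfold
    rw [hfold]
    set A : List Char := PySem.Set.union (PySem.Set.ofList string1.toList) string2.toList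
      with hA
    have hndA : A.Nodup := PySem.Set.nodup_union _ string2.toList (PySem.Set.nodup_ofList string1.toList)
    have hmemA : ∀ c, c ∈ string1.toList ∨ c ∈ string2.toList → c ∈ A := by
      intro c hc
      rw [hA, PySem.Set.mem_union]
      rcases hc with h | h
      · exact Or.inl (by rw [PySem.Set.mem_ofList]; exact h)
      · exact Or.inr h
    have hstep : ∀ c, pvStep (A.foldl (fun d c => d.insert c c) PySem.Dict.empty) c = c := by
      intro c
      unfold pvStep
      rw [pvInitGetD A (fun c => c) hndA]
      split <;> rfl
    rw [ufGo_eq (string2.toList.length + 1) A (string1.toList.zip string2.toList)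
      _ _ _ id (fun _ => 0) id
      ?_ ?_ ?_ ?_ ?_ ?_ ?_ ?_]
    · rw [List.map_snd_zip (by omega)]
    · intro p hp
      obtain ⟨h1, h2⟩ := List.of_mem_zip hp
      exact ⟨hmemA _ (Or.inl h1), hmemA _ (Or.inr h2)⟩
    · intro c hc
      exact absurd (hstep c) hc
    · intro c _
      rfl
    · intro c
      have := List.length_zip (l₁ := string1.toList) (l₂ := string2.toList)
      simp only [this]
      omega
    · intro c
      exact pvReach.root c (hstep c)
    · intro c _
      show c = _
      rw [pvInitGetD A (fun c => c) hndA]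
      split <;> rfl
    · intro c hc
      refine ⟨c, ?_, rfl⟩
      show (A.foldl (fun d c => d.insert c (some c)) PySem.Dict.empty).getD c none = some c
      rw [pvInitGetD A (fun c => some c) hndA, if_pos hc]
    · intro v r hr
      rw [pvInitGetD A (fun c => some c) hndA] at hr
      by_cases hv : v ∈ A
      · rw [if_pos hv] at hr
        obtain rfl := Option.some.inj hr
        show (A.foldl (fun d c => d.insert c c) PySem.Dict.empty).getD v v = v
        rw [pvInitGetD A (fun c => c) hndA]
        split <;> rfl
      · rw [if_neg hv] at hr
        cases hr
  · rw [if_pos (show (!(string1.toList.length == string2.toList.length)) = true by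
        simpa using hlen), if_pos hlen]
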